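-- pv_equiv track=rewrite | github.com/Mobi21/Kora | kora_v2/tools/truncation.py | _extract_error_portion
-- ===== SOURCE A (Python) =====
-- def _extract_error_portion(result: str) -> str | None:
--     """Extract error-related content from a result string.
--
--     Finds the earliest error marker and returns everything from that point.
--     Returns None if no error marker is found.
--     """
--     lower = result.lower()
--     earliest_idx = len(result)
--
--     for marker in [
--         "traceback (most recent call last):",
--         "traceback",
--         "error:",
--         "exception:",
--         "failed:",
--     ]:
--         idx = lower.find(marker)
--         if idx != -1 and idx < earliest_idx:
--             earliest_idx = idx
--
--     if earliest_idx < len(result):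
--         return result[earliest_idx:]
--
--     return None
-- ===== SOURCE B (Python) =====
-- def _extract_error_portion(result: str) -> str | None:
--     """Extract error-related content from a result string.
--
--     Single left-to-right scan: at each position test whether any marker
--     starts there (case-insensitively); the first hit is the earliest one.
--     The long "traceback (most recent call last):" marker is redundant for
--     the earliest index, since any occurrence starts with "traceback".
--     """
--     lower = result.lower()
--     markers = ("traceback", "error:", "exception:", "failed:")
--     for i in range(len(lower)):
--         if lower.startswith(markers, i):
--             return result[i:]
--     return None
-- ===== Notes on version B (the rewrite author's own statement) =====
-- stated objective: idiomatic
-- what changed: Replaces the per-marker find()+min-index bookkeeping by a single left-to-right scan using tuple startswith at each position (the redundant long traceback marker is dropped since only the start index matters), returning at the first hit.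
import Mathlib
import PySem

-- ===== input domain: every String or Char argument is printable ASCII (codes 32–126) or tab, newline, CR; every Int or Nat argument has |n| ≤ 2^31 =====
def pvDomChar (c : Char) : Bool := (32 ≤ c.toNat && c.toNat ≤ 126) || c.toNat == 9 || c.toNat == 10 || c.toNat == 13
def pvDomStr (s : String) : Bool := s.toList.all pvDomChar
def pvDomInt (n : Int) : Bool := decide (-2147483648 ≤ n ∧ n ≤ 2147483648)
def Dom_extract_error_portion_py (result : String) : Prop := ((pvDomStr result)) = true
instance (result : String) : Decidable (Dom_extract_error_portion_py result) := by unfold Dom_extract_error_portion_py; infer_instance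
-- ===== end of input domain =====

-- B replaces the per-marker find()+min bookkeeping by one left-to-right scan testing
-- the markers (tuple startswith) at each position; same behaviour, more idiomatic.


-- ===== PORT A =====
-- the marker list A iterates over, in A's order
def pvMarkersA : List String :=
  ["traceback (most recent call last):", "traceback", "error:", "exception:", "failed:"]

def extract_error_portion_py (result : String) : Option String :=
  let lower := PySem.Str.lower result
  let earliest : Int := PySem.Str.len result
  let earliest := pvMarkersA.foldl (fun earliest marker =>
    let idx := PySem.Str.find lower marker
    if idx ≠ -1 ∧ idx < earliest then idx else earliest) earliest
  if earliest < PySem.Str.len result then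
    some (PySem.Str.slice result (some earliest) none)
  else
    none

-- ===== PORT B =====
-- the marker tuple B tests with startswith (the long traceback marker is redundant)
def pvMarkersB : List (List Char) :=
  ["traceback".toList, "error:".toList, "exception:".toList, "failed:".toList]

-- the 'for i in range(len(lower))' scan: rest = lower[i:]; startswith(markers, i) = any marker a prefix of rest
def pvAltScan (orig : String) (rest : List Char) (i : Nat) : Option String :=
  match rest with
  | [] => none
  | c :: t =>
    if pvMarkersB.any (fun m => m.isPrefixOf (c :: t)) then
      some (PySem.Str.slice orig (some (i : Int)) none)   -- result[i:]
    else
      pvAltScan orig t (i + 1)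

def extract_error_portion_py_alt (result : String) : Option String :=
  pvAltScan result (PySem.Chars.lower result.toList) 0

-- ===== PRECONDITION & SPEC =====
def Spec_extract_error_portion_py (result : String) (out : Option String) : Prop := out = extract_error_portion_py_alt result
instance (result : String) (out : Option String) : Decidable (Spec_extract_error_portion_py result out) := by unfold Spec_extract_error_portion_py; infer_instance

-- ===== CLAIM (what is proved, stated in full; the proofs are below) =====
def Claim_equal_extract_error_portion_py : Prop := ∀ (result : String), Dom_extract_error_portion_py result → Spec_extract_error_portion_py result (extract_error_portion_py result)

-- ===== LEMMAS AND PROOFS =====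

-- A's per-marker step, on the list side
def pvStep (L : List Char) (e : Int) (m : String) : Int :=
  if PySem.Chars.find L m.toList ≠ -1 ∧ PySem.Chars.find L m.toList < e then
    PySem.Chars.find L m.toList
  else e

-- invariant of A's fold after processing the markers in S
def pvInv (L : List Char) (n : Nat) (S : List String) (e : Int) : Prop :=
  0 ≤ e ∧ e ≤ n ∧
  (e = n ∨ ∃ m ∈ S, m.toList <+: L.drop e.toNat) ∧
  (∀ m ∈ S, ∀ j : Nat, (j : Int) < e → ¬ m.toList <+: L.drop j)

theorem pv_prefix_drop_infix {m L : List Char} {j : Nat} (h : m <+: L.drop j) : m <:+: L := by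
  obtain ⟨t, ht⟩ := h
  exact ⟨L.take j, t, by rw [List.append_assoc, ht, List.take_append_drop]⟩

theorem pvStep_inv {L : List Char} {n : Nat} {S : List String} {e : Int} (m : String)
    (h : pvInv L n S e) : pvInv L n (m :: S) (pvStep L e m) := by
  obtain ⟨h0, h1, h2, h3⟩ := h
  unfold pvStep
  by_cases hc : PySem.Chars.find L m.toList ≠ -1 ∧ PySem.Chars.find L m.toList < e
  · simp only [if_pos hc]
    obtain ⟨hne, hlt⟩ := hc
    have hFn : -1 ≤ PySem.Chars.find L m.toList := PySem.Chars.neg_one_le_find L m.toList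
    have hF0 : 0 ≤ PySem.Chars.find L m.toList := by omega
    have hspec := PySem.Chars.find_spec (s := L) (sub := m.toList) hF0
    refine ⟨hF0, by omega, Or.inr ⟨m, List.mem_cons_self, hspec.1⟩, ?_⟩
    intro m' hm' j hj
    rcases List.mem_cons.mp hm' with rfl | hm'
    · exact hspec.2 j (by omega)
    · exact h3 m' hm' j (by omega)
  · simp only [if_neg hc]
    refine ⟨h0, h1, ?_, ?_⟩
    · rcases h2 with h2 | ⟨m', hm', hp⟩
      · exact Or.inl h2
      · exact Or.inr ⟨m', List.mem_cons_of_mem _ hm', hp⟩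
    · intro m' hm' j hj
      rcases List.mem_cons.mp hm' with rfl | hm'
      · by_cases hne : PySem.Chars.find L m'.toList = -1
        · intro hp
          exact (PySem.Chars.find_eq_neg_one_iff L m'.toList).mp hne (pv_prefix_drop_infix hp)
        · have hFe : e ≤ PySem.Chars.find L m'.toList := by
            by_contra hfe
            exact hc ⟨hne, by omega⟩
          have hF0 : 0 ≤ PySem.Chars.find L m'.toList := by omega
          exact (PySem.Chars.find_spec (s := L) (sub := m'.toList) hF0).2 j (by omega)
      · exact h3 m' hm' j hj

theorem pvFoldl_inv {L : List Char} {n : Nat} :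
    ∀ (M P : List String) (e : Int), pvInv L n P e →
      pvInv L n (M.reverse ++ P) (M.foldl (pvStep L) e) := by
  intro M
  induction M with
  | nil => intro P e h; simpa using h
  | cons m M ih =>
    intro P e h
    have := ih (m :: P) (pvStep L e m) (pvStep_inv m h)
    simpa [List.append_assoc] using this

-- the membership sets of A's five markers and B's four agree on "some marker starts here"
theorem pvMarkers_equiv (X : List Char) :
    (∃ m ∈ pvMarkersA, m.toList <+: X) ↔ (pvMarkersB.any (fun m => m.isPrefixOf X) = true) := by
  simp only [pvMarkersA, pvMarkersB, List.any_eq_true, List.mem_cons, List.not_mem_nil, or_false,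
    List.isPrefixOf_iff_prefix]
  constructor
  · rintro ⟨m, (rfl | rfl | rfl | rfl | rfl), hp⟩
    · exact ⟨"traceback".toList, Or.inl rfl, List.IsPrefix.trans (by decide) hp⟩
    · exact ⟨"traceback".toList, Or.inl rfl, hp⟩
    · exact ⟨"error:".toList, Or.inr (Or.inl rfl), hp⟩
    · exact ⟨"exception:".toList, Or.inr (Or.inr (Or.inl rfl)), hp⟩
    · exact ⟨"failed:".toList, Or.inr (Or.inr (Or.inr rfl)), hp⟩
  · rintro ⟨m, (rfl | rfl | rfl | rfl), hp⟩
    · exact ⟨"traceback", Or.inr (Or.inl rfl), hp⟩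
    · exact ⟨"error:", Or.inr (Or.inr (Or.inl rfl)), hp⟩
    · exact ⟨"exception:", Or.inr (Or.inr (Or.inr (Or.inl rfl))), hp⟩
    · exact ⟨"failed:", Or.inr (Or.inr (Or.inr (Or.inr rfl))), hp⟩

theorem pvAltScan_none (orig : String) :
    ∀ (rest : List Char) (i : Nat),
      (∀ k : Nat, pvMarkersB.any (fun m => m.isPrefixOf (rest.drop k)) = false) →
      pvAltScan orig rest i = none := by
  intro rest
  induction rest with
  | nil => intro i _; rfl
  | cons c t ih =>
    intro i h
    have h0 := h 0
    simp only [List.drop_zero] at h0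
    rw [pvAltScan, if_neg (by simp [h0])]
    exact ih (i + 1) (fun k => h (k + 1))

theorem pvAltScan_some (orig : String) :
    ∀ (rest : List Char) (i k0 : Nat),
      pvMarkersB.any (fun m => m.isPrefixOf (rest.drop k0)) = true →
      (∀ k < k0, pvMarkersB.any (fun m => m.isPrefixOf (rest.drop k)) = false) →
      pvAltScan orig rest i = some (PySem.Str.slice orig (some ((i + k0 : Nat) : Int)) none) := by
  intro rest
  induction rest with
  | nil =>
    intro i k0 hk0 _
    simp [pvMarkersB] at hk0
  | cons c t ih =>
    intro i k0 hk0 hmin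
    cases k0 with
    | zero =>
      simp only [List.drop_zero] at hk0
      rw [pvAltScan, if_pos hk0]
      simp
    | succ k0' =>
      have h0 := hmin 0 (Nat.succ_pos _)
      simp only [List.drop_zero] at h0
      rw [pvAltScan, if_neg (by simp [h0])]
      have harg : i + 1 + k0' = i + (k0' + 1) := by omega
      have := ih (i + 1) k0' (by simpa using hk0)
        (fun k hk => by simpa using hmin (k + 1) (by omega))
      rw [this, harg]

-- ===== VERDICT (by name: the statement is the Claim_ definition above) =====
theorem extract_error_portion_py_spec : Claim_equal_extract_error_portion_py := by
  intro result _
  show extract_error_portion_py result = extract_error_portion_py_alt result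
  set s : List Char := result.toList with hs
  set L : List Char := PySem.Chars.lower s with hL
  have hLlen : L.length = s.length := by simp [hL, PySem.Chars.lower]
  set n : Nat := s.length with hn
  have hfun : (fun (earliest : Int) (marker : String) =>
      if PySem.Str.find (PySem.Str.lower result) marker ≠ -1 ∧
          PySem.Str.find (PySem.Str.lower result) marker < earliest then
        PySem.Str.find (PySem.Str.lower result) marker
      else earliest) = pvStep L := by
    funext e m
    simp [pvStep, PySem.Str.find_eq, PySem.Str.toList_lower, hL, hs]
  have hlen : PySem.Str.len result = (n : Int) := by
    rw [PySem.Str.len_eq]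
  simp only [extract_error_portion_py, hfun, hlen]
  set e : Int := pvMarkersA.foldl (pvStep L) (n : Int) with he
  have hinv : pvInv L n (pvMarkersA.reverse ++ []) e := by
    refine pvFoldl_inv pvMarkersA [] (n : Int) ?_
    exact ⟨Int.natCast_nonneg n, le_refl _, Or.inl rfl, by simp⟩
  obtain ⟨h0, h1, h2, h3⟩ := hinv
  unfold extract_error_portion_py_alt
  rw [← hs, ← hL]
  by_cases hcase : e < (n : Int)
  · rw [if_pos hcase]
    have hocc : ∃ m ∈ pvMarkersA, m.toList <+: L.drop e.toNat := by
      rcases h2 with h2 | ⟨m, hm, hp⟩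
      · omega
      · exact ⟨m, by simpa using hm, hp⟩
    have hany : pvMarkersB.any (fun m => m.isPrefixOf (L.drop e.toNat)) = true :=
      (pvMarkers_equiv _).mp hocc
    have hmin : ∀ k < e.toNat, pvMarkersB.any (fun m => m.isPrefixOf (L.drop k)) = false := by
      intro k hk
      by_contra hne
      have htrue : pvMarkersB.any (fun m => m.isPrefixOf (L.drop k)) = true := by
        simpa using hne
      obtain ⟨m, hm, hp⟩ := (pvMarkers_equiv _).mpr htrue
      exact h3 m (by simpa using hm) k (by omega) hp
    have hcast : ((0 + e.toNat : Nat) : Int) = e := by omega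
    rw [pvAltScan_some result L 0 e.toNat hany hmin, hcast]
  · rw [if_neg hcase]
    have hen : e = (n : Int) := by omega
    rw [pvAltScan_none result L 0 ?_]
    intro k
    by_cases hk : k < n
    · by_contra hne
      have htrue : pvMarkersB.any (fun m => m.isPrefixOf (L.drop k)) = true := by
        simpa using hne
      obtain ⟨m, hm, hp⟩ := (pvMarkers_equiv _).mpr htrue
      exact h3 m (by simpa using hm) k (by omega) hp
    · have : L.drop k = [] := List.drop_eq_nil_of_le (by omega)
      rw [this]
      decide
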